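/- GENERATED by tools/from_farm_form.py from farm/worked/heap_product_ok/Proof.lean (a worked proof of the farm's unit `heap_product_ok`,
   accepted by the verdict) — do not edit. -/
import ProgX.Base.Spec.Units.heap_product_ok

open X86 X86.User Asan ProgX.Base

set_option maxRecDepth 4000
set_option maxHeartbeats 4000000

/-- `heap_product_ok` (c/base/heap.c, static; 0x104300 in the base image, 18 instructions) satisfies `ProgX.Base.Spec.heap_product_ok.spec`: five paths, no
memory access but the `ret`'s.
(Carried over from agent GA's proof against its test image, c/heap/heaptest.elf: tools/port_heap_units.py.) -/
theorem ProgX.Base.Spec.Proved.heap_product_ok_ok : ProgX.Base.Spec.heap_product_ok.Statement := by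
  intro Lay hLay μ hμ u₀ hcode u ret he _hpre
  v_entry he
  u_walk hcode [hμ.vendor] span [ProgX.Base.L.textLo, ProgX.Base.L.textHi] side (v_side)
  all_goals (
    refine ReachVia.done ?_
    v_returned
    refine ⟨w_mem, fun hyes => ?_, fun hno => ?_⟩
    · first
        | (rw [w_rax]; rfl)
        | (exfalso; omega)
    · first
        | (rw [w_rax]; rfl)
        | (exfalso; omega))
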